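-- pv_equiv track=rewrite | github.com/wenjie-lu/AOC2020 | day24.py | parse_inputs
-- ===== SOURCE A (Python) =====
-- def parse_inputs(inputs):
--     instrs = []
--     for line in inputs:
--         instr = []
--         i = 0
--         while i < len(line):
--             if line[i:i+2] in ['se', 'sw', 'nw', 'ne']:
--                 instr.append(line[i:i+2])
--                 i += 2
--             elif line[i] in ['e', 'w']:
--                 instr.append(line[i])
--                 i += 1
--             else:
--                 raise ValueError('Error in parsing file')
--         instrs.append(instr)
--     return instrs
-- ===== SOURCE B (Python) =====
-- def parse_inputs(inputs):
--     return [_tokenize(line) for line in inputs]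
--
-- def _tokenize(line):
--     out = []
--     it = iter(line)
--     for c in it:
--         if c in ('s', 'n'):
--             d = next(it, None)
--             if d not in ('e', 'w'):
--                 raise ValueError('Error in parsing file')
--             out.append(c + d)
--         elif c in ('e', 'w'):
--             out.append(c)
--         else:
--             raise ValueError('Error in parsing file')
--     return out
-- ===== Notes on version B (the rewrite author's own statement) =====
-- stated objective: simpler
-- what changed: Replaces A's index-and-slice while loop (testing the two-char slice against a list of four literals, then the one-char slice) with a direct single-pass iterator that classifies each character and pairs 's'/'n' with the next character, one token list per line via a list comprehension; Pre_ excludes exactly the inputs on which both A and B raise ValueError (a line not formed of se/sw/nw/ne/e/w tokens).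
import Mathlib
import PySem

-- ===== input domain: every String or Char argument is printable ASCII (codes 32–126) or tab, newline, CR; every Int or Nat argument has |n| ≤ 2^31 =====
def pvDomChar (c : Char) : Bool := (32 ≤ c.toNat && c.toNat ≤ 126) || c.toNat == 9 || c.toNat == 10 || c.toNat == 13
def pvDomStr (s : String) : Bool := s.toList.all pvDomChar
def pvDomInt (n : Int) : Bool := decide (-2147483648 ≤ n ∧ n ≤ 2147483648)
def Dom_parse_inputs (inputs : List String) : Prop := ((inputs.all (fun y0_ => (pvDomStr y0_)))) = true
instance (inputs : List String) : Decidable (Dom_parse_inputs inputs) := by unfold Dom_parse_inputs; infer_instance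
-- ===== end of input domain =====

-- B replaces A's index-and-slice while loop by a direct one-pass recursion over the
-- characters, pairing 's'/'n' with the following character; objective: simpler.

-- ===== PORT A =====
-- A's while loop over index i with slices line[i:i+2]; the remaining suffix
-- line.drop i represents i, so two = line[i:i+2] is rest.take 2 and i += k is rest.drop k.
def pvALoop (rest : List Char) (instr : List String) : List String :=
  if _h : 0 < rest.length then  -- while i < len(line)
    let two := rest.take 2      -- line[i:i+2]
    if two = ['s','e'] ∨ two = ['s','w'] ∨ two = ['n','w'] ∨ two = ['n','e'] then
      pvALoop (rest.drop 2) (instr ++ [String.ofList two])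
    else if rest.take 1 = ['e'] ∨ rest.take 1 = ['w'] then  -- line[i] in ['e','w']
      pvALoop (rest.drop 1) (instr ++ [String.ofList (rest.take 1)])
    else
      instr  -- raise ValueError (excluded by Pre_)
  else instr
  termination_by rest.length
  decreasing_by all_goals (simp; omega)

def parse_inputs (inputs : List String) : List (List String) :=
  inputs.foldl (fun instrs line => instrs ++ [pvALoop line.toList []]) []

-- ===== PORT B =====
-- Source B's _tokenize: consume one char; 's'/'n' grabs the next char too.
def pvBtok : List Char → List String
  | [] => []
  | c :: rest =>
    if c = 's' ∨ c = 'n' then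
      match rest with
      | d :: rest' =>
        if d = 'e' ∨ d = 'w' then String.ofList [c, d] :: pvBtok rest'
        else []  -- raise ValueError (excluded by Pre_)
      | [] => []  -- raise ValueError (excluded by Pre_)
    else if c = 'e' ∨ c = 'w' then
      String.ofList [c] :: pvBtok rest
    else []  -- raise ValueError (excluded by Pre_)

def parse_inputs_alt (inputs : List String) : List (List String) :=
  inputs.map (fun line => pvBtok line.toList)

-- ===== PRECONDITION & SPEC =====
-- Pre_ excludes exactly the inputs on which A (and B) raise ValueError.  Closed form: a line
-- parses iff every character is one of e/w/s/n, every 's'/'n' is immediately followed by an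
-- 'e' or 'w' (checked on adjacent pairs), and the last character is not 's'/'n'.
def pvLineOk (cs : List Char) : Bool :=
  cs.all (fun c => c = 'e' || c = 'w' || c = 's' || c = 'n') &&
  (cs.zip (cs.drop 1)).all (fun p => !(p.1 = 's' || p.1 = 'n') || (p.2 = 'e' || p.2 = 'w')) &&
  !(cs.getLast? = some 's' || cs.getLast? = some 'n')

def Pre_parse_inputs (inputs : List String) : Prop :=
  inputs.all (fun line => pvLineOk line.toList) = true
instance (inputs : List String) : Decidable (Pre_parse_inputs inputs) := by
  unfold Pre_parse_inputs; infer_instance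

def pvWitness_parse_inputs : List String := ["esenee", ""]

def Spec_parse_inputs (inputs : List String) (out : List (List String)) : Prop := out = parse_inputs_alt inputs
instance (inputs : List String) (out : List (List String)) : Decidable (Spec_parse_inputs inputs out) := by unfold Spec_parse_inputs; infer_instance

-- ===== CLAIM (what is proved, stated in full; the proofs are below) =====
def Claim_equal_parse_inputs : Prop := ∀ (inputs : List String), Dom_parse_inputs inputs → Pre_parse_inputs inputs → Spec_parse_inputs inputs (parse_inputs inputs)

-- ===== LEMMAS AND PROOFS =====

-- Proof-layer bridge: the recursive grammar check the induction runs on.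
def pvGoodLine : List Char → Bool
  | [] => true
  | c :: rest =>
    if c = 'e' ∨ c = 'w' then pvGoodLine rest
    else if c = 's' ∨ c = 'n' then
      match rest with
      | d :: rest' => (d = 'e' ∨ d = 'w') && pvGoodLine rest'
      | [] => false
    else false

-- pvLineOk is closed under taking the tail.
theorem pvLineOk_tail (c : Char) (rs : List Char) (h : pvLineOk (c :: rs) = true) :
    pvLineOk rs = true := by
  cases rs with
  | nil => decide
  | cons d t =>
    simp only [pvLineOk, List.all_cons, List.drop_succ_cons, List.drop_zero,
      List.zip_cons_cons, List.getLast?_cons_cons, Bool.and_eq_true] at h ⊢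
    exact ⟨⟨h.1.1.2, h.1.2.2⟩, h.2⟩

-- The closed-form condition implies the recursive grammar check.
theorem pvLineOk_good (n : Nat) : ∀ cs : List Char, cs.length ≤ n →
    pvLineOk cs = true → pvGoodLine cs = true := by
  induction n with
  | zero =>
    intro cs hlen _
    cases cs with
    | nil => decide
    | cons c rs => simp only [List.length_cons] at hlen; omega
  | succ n ih =>
    intro cs hlen hok
    cases cs with
    | nil => decide
    | cons c rs =>
      have hc : (c = 'e' || c = 'w' || c = 's' || c = 'n') = true := by
        have := (Bool.and_eq_true_iff.mp ((Bool.and_eq_true_iff.mp hok).1)).1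
        rw [List.all_cons, Bool.and_eq_true_iff] at this
        exact this.1
      rw [pvGoodLine.eq_def]
      simp only []
      by_cases hew : c = 'e' ∨ c = 'w'
      · rw [if_pos hew]
        exact ih rs (by simp only [List.length_cons] at hlen; omega) (pvLineOk_tail c rs hok)
      · have hsn : c = 's' ∨ c = 'n' := by
          simp only [Bool.or_eq_true, decide_eq_true_eq] at hc
          tauto
        rw [if_neg hew, if_pos hsn]
        cases rs with
        | nil =>
          exfalso
          have := (Bool.and_eq_true_iff.mp hok).2
          rcases hsn with h | h <;> subst h <;> simp at this
        | cons d t =>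
          have hd : d = 'e' ∨ d = 'w' := by
            have := (Bool.and_eq_true_iff.mp ((Bool.and_eq_true_iff.mp hok).1)).2
            rw [List.drop_succ_cons, List.drop_zero, List.zip_cons_cons, List.all_cons,
              Bool.and_eq_true_iff] at this
            have h1 := this.1
            rcases hsn with h | h <;> subst h <;> simpa using h1
          have ht : pvLineOk t = true := pvLineOk_tail d t (pvLineOk_tail c (d :: t) hok)
          rw [Bool.and_eq_true_iff]
          exact ⟨by simpa using hd,
            ih t (by simp only [List.length_cons] at hlen; omega) ht⟩

theorem pvBtok_cons_ew (c : Char) (rs : List Char) (h1 : ¬(c = 's' ∨ c = 'n'))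
    (h2 : c = 'e' ∨ c = 'w') : pvBtok (c :: rs) = String.ofList [c] :: pvBtok rs := by
  rw [pvBtok.eq_def]; simp only []; rw [if_neg h1, if_pos h2]

theorem pvBtok_cons_sn (c d : Char) (rs : List Char) (h1 : c = 's' ∨ c = 'n')
    (h2 : d = 'e' ∨ d = 'w') : pvBtok (c :: d :: rs) = String.ofList [c, d] :: pvBtok rs := by
  rw [pvBtok.eq_def]; simp only []; rw [if_pos h1, if_pos h2]

-- A's loop, on a line accepted by the grammar, appends exactly B's token list.
theorem pvALoop_eq (n : Nat) : ∀ rest : List Char, rest.length ≤ n →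
    pvGoodLine rest = true → ∀ instr, pvALoop rest instr = instr ++ pvBtok rest := by
  induction n with
  | zero =>
    intro rest hlen _ instr
    cases rest with
    | nil => simp [pvALoop, pvBtok]
    | cons c rs => simp only [List.length_cons] at hlen; omega
  | succ n ih =>
    intro rest hlen hg instr
    cases rest with
    | nil => simp [pvALoop, pvBtok]
    | cons c rs =>
      rw [pvGoodLine.eq_def] at hg; simp only [] at hg
      by_cases hew : c = 'e' ∨ c = 'w'
      · rw [if_pos hew] at hg
        rcases hew with h | h <;> subst h <;>
          (rw [pvALoop, pvBtok_cons_ew _ _ (by decide) (by decide)];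
           simp [ih rs (by simpa using Nat.le_of_succ_le_succ hlen) hg])
      · rw [if_neg hew] at hg
        by_cases hsn : c = 's' ∨ c = 'n'
        · rw [if_pos hsn] at hg
          cases rs with
          | nil => simp at hg
          | cons d rs' =>
            simp only [Bool.and_eq_true, decide_eq_true_eq] at hg
            obtain ⟨hd, hrs⟩ := hg
            have hlen' : rs'.length ≤ n := by simp at hlen; omega
            rcases hsn with h | h <;> rcases hd with h2 | h2 <;> subst h <;> subst h2 <;>
              (rw [pvALoop, pvBtok_cons_sn _ _ _ (by decide) (by decide)];
               simp [ih rs' hlen' hrs])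
        · rw [if_neg hsn] at hg
          exact absurd hg (by simp)

theorem pvFoldl_map (l : List String) :
    ∀ init, l.foldl (fun instrs line => instrs ++ [pvALoop line.toList []]) init
      = init ++ l.map (fun line => pvALoop line.toList []) := by
  induction l with
  | nil => simp
  | cons x xs ih => intro init; simp [List.foldl, ih]

-- ===== VERDICT (by name: the statement is the Claim_ definition above) =====
theorem parse_inputs_spec : Claim_equal_parse_inputs := by
  intro inputs _hdom hpre
  unfold Spec_parse_inputs parse_inputs parse_inputs_alt
  rw [pvFoldl_map]
  simp only [List.nil_append]
  apply List.map_congr_left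
  intro line hline
  have hok : pvLineOk line.toList = true := by
    rw [Pre_parse_inputs, List.all_eq_true] at hpre
    exact hpre line hline
  have hg : pvGoodLine line.toList = true :=
    pvLineOk_good line.toList.length line.toList le_rfl hok
  simpa using pvALoop_eq line.toList.length line.toList le_rfl hg []
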